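/- GENERATED by mk_final_copies.py from the proof of the farm's unit `stb_vorbis_get_file_offset` (farm:stb_vorbis_get_file_offset.1: Proof.lean) as the
   re-elaboration sweep compiled it — do not edit. -/
import Asan.CheckWalk
import Vorbis.Spec.Units.stb_vorbis_get_file_offset

open X86 X86.User Asan Vorbis

set_option maxRecDepth 4000
set_option maxHeartbeats 4000000

namespace Vorbis.Spec.stb_vorbis_get_file_offset

/-- The value of `mov eax, ebp ; sub eax, [rbx + 0x38]` as a number: the 32-bit difference of the low half of the 8-byte
load `a` (`stream`) and the 4-byte load `b` (the low half of `stream_start`), zero-extended into rax. -/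
theorem toNat_sub_eax (a b : Nat) (hb : b < 2 ^ 32) :
    (Word.ofBV (Word.part Width.w32 (UInt64.ofNat a) - BitVec.ofNat 32 b)).toNat =
      (a % 2 ^ 32 + 2 ^ 32 - b) % 2 ^ 32 := by
  rw [Vorbis.toNat_ofBV32, BitVec.toNat_sub, Vorbis.toNat_part32, BitVec.toNat_ofNat, UInt64.toNat_ofNat']
  have e : b % 2 ^ 32 = b := Nat.mod_eq_of_lt hb
  rw [e]
  omega

end Vorbis.Spec.stb_vorbis_get_file_offset

/-- `stb_vorbis_get_file_offset(f)` satisfies its contract: two checked 8-byte loads inside `*f` (`f + 48`, `f + 56`), a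
32-bit subtraction, two pushes and pops around it; straight-line code. -/
theorem Vorbis.Spec.Worked.stb_vorbis_get_file_offset_ok : Vorbis.Spec.stb_vorbis_get_file_offset.Statement := by
  intro Lay hLay μ hμ u₀ hcode hload8 others frames u ret he hpre
  v_entry he
  obtain ⟨hsh, hobj⟩ := hpre
  -- where `*f` is: one arithmetic fact (inside the data space, off the text, off this function's stack)
  have hsp := hsh.rsp
  have hwhere := hobj.where_ hsh.inv hsh.offText (by u_omega)
  u_walk hcode [hμ.vendor] span [Vorbis.L.textLo, Vorbis.L.textHi] side (v_side)
  · -- 0x10c6cd, stb_vorbis_fixed.c:4577: the check of the load of `f->stream` (`f + 48`, 8 bytes): inside `*f`;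
    -- the three stack stores so far did not touch the shadow
    have hun : ShadowUntouched u.mem s_10c6cd.mem := by v_untouched
    exact hobj.accSmall hsh.inv hun _ 8 (by decide) (by u_omega) (by u_omega)
  · -- 0x10c6da, stb_vorbis_fixed.c:4577: the check of the load of `f->stream_start` (`f + 56`, 8 bytes): inside `*f`
    have hun : ShadowUntouched u.mem s_10c6da.mem := by v_untouched
    exact hobj.accSmall hsh.inv hun _ 8 (by decide) (by u_omega) (by u_omega)
  · -- 0x10c6ea, stb_vorbis_fixed.c:4581: the state after the `ret`: the contract's `Returned`
    refine ReachVia.done ?_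
    v_returned
    refine ⟨?_, by v_untouched⟩
    -- the value returned: the 32-bit difference of the two loads
    have hb : u.mem.readLE (u.reg .rdi + 56) 4 < 2 ^ 32 := Mem.readLE_lt _ _ _
    rw [w_rax]
    exact Vorbis.Spec.stb_vorbis_get_file_offset.toNat_sub_eax _ _ hb
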